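-- pv_equiv track=rewrite | github.com/shalgrim/advent_of_code_2015 | day19_1.py | make_replacements
-- ===== SOURCE A (Python) =====
-- def make_replacements(starter, rule):
--     answer = set()
--     lindex = starter.find(rule[0])
--     while lindex >= 0:
--         replacement = starter[:lindex] + rule[1] + starter[lindex + len(rule[0]) :]
--         answer.add(replacement)
--         lindex = starter.find(rule[0], lindex + 1)
--
--     return answer
-- ===== SOURCE B (Python) =====
-- def make_replacements(starter, rule):
--     old, new = rule
--     m = len(old)
--     mask = {}
--     for j, c in enumerate(old):
--         mask[c] = mask.get(c, 0) | (1 << j)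
--     hi = 1 << (m - 1)
--     answer = set()
--     state = 0
--     for i, c in enumerate(starter):
--         state = ((state << 1) | 1) & mask.get(c, 0)
--         if state & hi:
--             p = i + 1 - m
--             answer.add(starter[:p] + new + starter[p + m:])
--     return answer
-- ===== Notes on version B (the rewrite author's own statement) =====
-- stated objective: alternative
-- what changed: A chains str.find calls to jump from one occurrence to the next; B runs the bit-parallel Shift-And (bitap) matcher: it builds a per-character bitmask table from rule[0] once, then makes one pass over starter updating a single integer whose bit p says 'the first p+1 chars of the pattern end here', emitting a replacement whenever the top bit fires.
-- outside the precondition, e.g. on make_replacements('ab', ('', 'X')): A returns {'Xab', 'aXb', 'abX'}, B raises ValueError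
import Mathlib
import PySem

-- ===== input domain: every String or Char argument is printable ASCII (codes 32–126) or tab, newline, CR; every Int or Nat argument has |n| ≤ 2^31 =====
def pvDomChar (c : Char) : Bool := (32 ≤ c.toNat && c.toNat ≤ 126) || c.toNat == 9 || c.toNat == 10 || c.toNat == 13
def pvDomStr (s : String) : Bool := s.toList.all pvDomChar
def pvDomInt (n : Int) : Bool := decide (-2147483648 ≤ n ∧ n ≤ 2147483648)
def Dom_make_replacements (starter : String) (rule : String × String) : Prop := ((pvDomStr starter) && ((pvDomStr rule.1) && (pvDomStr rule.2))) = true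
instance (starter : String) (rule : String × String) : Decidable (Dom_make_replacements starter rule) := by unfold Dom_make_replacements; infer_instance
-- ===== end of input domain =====

-- B replaces A's find-chaining while loop by the bit-parallel Shift-And (bitap) matcher:
-- a per-character bitmask table built once from rule[0], then one pass over starter updating
-- an integer whose bit p says "the first p+1 pattern chars end here" (objective: alternative).

-- ===== PORT A =====
-- the while loop of A: answer/lindex are the loop state; fuel = len(starter)+1 bounds the
-- iteration count (each iteration strictly increases lindex, which stays ≤ len(starter))
def pvAGo (s old new : List Char) (fuel : Nat) (answer : PySem.Set (List Char)) (lindex : Int) :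
    PySem.Set (List Char) :=
  match fuel with
  | 0 => answer
  | fuel + 1 =>
    if lindex ≥ 0 then
      let replacement :=
        PySem.List.slice s none (some lindex) ++ new ++
          PySem.List.slice s (some (lindex + old.length)) none
      pvAGo s old new fuel (PySem.Set.add answer replacement) (PySem.Chars.findFrom s old (lindex + 1))
    else answer

def make_replacements (starter : String) (rule : String × String) : List String :=
  let s := starter.toList
  (pvAGo s rule.1.toList rule.2.toList (s.length + 1) [] (PySem.Chars.find s rule.1.toList)).map
    String.ofList

-- ===== PORT B =====
-- 'for j, c in enumerate(old): mask[c] = mask.get(c, 0) | (1 << j)' — structural recursion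
-- carrying the enumerate counter j; the mask values are Python non-negative ints, modelled as Nat
-- (| and << on non-negative Python ints coincide with Nat's ||| and <<<)
def pvMaskGo (d : PySem.Dict Char Nat) (j : Nat) : List Char → PySem.Dict Char Nat
  | [] => d
  | c :: cs => pvMaskGo (d.insert c ((d.getD c 0) ||| (1 <<< j))) (j + 1) cs

-- 'for i, c in enumerate(starter): …' — i is the enumerate counter, state/answer the loop state;
-- under Pre_ (old ≠ '') a fired match has old.length ≤ i+1, so the Nat subtraction i+1-m is exact
def pvBGo (s old new : List Char) (mask : PySem.Dict Char Nat) (hi : Nat)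
    (i : Nat) (state : Nat) (answer : PySem.Set (List Char)) :
    List Char → PySem.Set (List Char)
  | [] => answer
  | c :: rest =>
    let state' := ((state <<< 1) ||| 1) &&& mask.getD c 0
    if state' &&& hi ≠ 0 then
      let p := i + 1 - old.length
      pvBGo s old new mask hi (i + 1) state'
        (PySem.Set.add answer (s.take p ++ new ++ s.drop (p + old.length))) rest
    else
      pvBGo s old new mask hi (i + 1) state' answer rest

def make_replacements_alt (starter : String) (rule : String × String) : List String :=
  let s := starter.toList
  let old := rule.1.toList
  let new := rule.2.toList
  let mask := pvMaskGo PySem.Dict.empty 0 old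
  -- Python's 'hi = 1 << (m - 1)' raises ValueError for old = ''; that input is outside Pre_
  let hi := 1 <<< (old.length - 1)
  (pvBGo s old new mask hi 0 0 [] s).map String.ofList

-- ===== PRECONDITION & SPEC =====
-- Pre_ excludes exactly rule.1 = "": there A still returns (find('') enumerates every position),
-- but B's Shift-And computes 1 << (len(rule[0]) - 1) and raises ValueError (negative shift).
def Pre_make_replacements (starter : String) (rule : String × String) : Prop := rule.1 ≠ ""
instance (starter : String) (rule : String × String) : Decidable (Pre_make_replacements starter rule) := by unfold Pre_make_replacements; infer_instance

def pvWitness_make_replacements : String × (String × String) := ("aabcab", ("ab", "XY"))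

def Spec_make_replacements (starter : String) (rule : String × String) (out : List String) : Prop := out = make_replacements_alt starter rule
instance (starter : String) (rule : String × String) (out : List String) : Decidable (Spec_make_replacements starter rule out) := by unfold Spec_make_replacements; infer_instance

-- ===== CLAIM (what is proved, stated in full; the proofs are below) =====
def Claim_equal_make_replacements : Prop := ∀ (starter : String) (rule : String × String), Dom_make_replacements starter rule → Pre_make_replacements starter rule → Spec_make_replacements starter rule (make_replacements starter rule)

-- ===== LEMMAS AND PROOFS =====

-- the common step: add the replacement built at match position q
def pvStep (s old new : List Char) (acc : PySem.Set (List Char)) (q : Nat) :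
    PySem.Set (List Char) :=
  PySem.Set.add acc (s.take q ++ new ++ s.drop (q + old.length))

-- match positions are where old is a prefix of the suffix
def pvP (s old : List Char) (q : Nat) : Bool := old.isPrefixOf (s.drop q)

lemma pvP_false_of_lt (s old : List Char) (q : Nat) (hq : q ≤ s.length)
    (h : s.length < q + old.length) : pvP s old q = false := by
  unfold pvP
  rcases hb : old.isPrefixOf (s.drop q) with _ | _
  · rfl
  · exact absurd ((List.isPrefixOf_iff_prefix.mp hb).length_le) (by simp; omega)

lemma pvP_false_of_no_infix (s old : List Char) (k q : Nat) (hk : k ≤ q)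
    (h : ¬ old <:+: s.drop k) : pvP s old q = false := by
  unfold pvP
  rcases hb : old.isPrefixOf (s.drop q) with _ | _
  · rfl
  · exfalso
    apply h
    rw [← PySem.Chars.isIn_iff_infix, ← PySem.Chars.exists_prefix_drop_iff_isIn]
    refine ⟨q - k, ?_⟩
    rw [List.drop_drop]
    rwa [Nat.add_sub_cancel' hk, ← List.isPrefixOf_iff_prefix]

-- the first match splits the filtered range
lemma pvFilter_split (p : Nat → Bool) (k n f : Nat) (hf : k + f ≤ n) (hp : p (k + f) = true)
    (hmin : ∀ i, k ≤ i → i < k + f → p i = false) :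
    (List.range' k (n + 1 - k)).filter p =
      (k + f) :: (List.range' (k + f + 1) (n + 1 - (k + f + 1))).filter p := by
  have hsplit : List.range' k f ++ List.range' (k + f) (n + 1 - (k + f)) =
      List.range' k (n + 1 - k) := by
    have := List.range'_append (s := k) (m := f) (n := n + 1 - (k + f)) (step := 1)
    rw [show f + (n + 1 - (k + f)) = n + 1 - k by omega, Nat.one_mul] at this
    exact this
  rw [← hsplit, List.filter_append]
  have h1 : (List.range' k f).filter p = [] := by
    rw [List.filter_eq_nil_iff]
    intro a ha
    rw [List.mem_range'_1] at ha
    simp [hmin a ha.1 ha.2]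
  have h2 : List.range' (k + f) (n + 1 - (k + f)) =
      (k + f) :: List.range' (k + f + 1) (n + 1 - (k + f + 1)) := by
    rw [show n + 1 - (k + f) = (n + 1 - (k + f + 1)) + 1 by omega, List.range'_succ]
  rw [h1, h2, List.filter_cons_of_pos hp]
  simp

-- CHARACTERIZATION OF A's LOOP: started at the first match index ≥ k, with enough fuel,
-- it folds pvStep over all match positions in [k, len]
lemma pvAGo_char (s old new : List Char) (fuel : Nat) :
    ∀ (k : Nat) (answer : PySem.Set (List Char)), k ≤ s.length + 1 →
      s.length + 1 - k ≤ fuel →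
      pvAGo s old new fuel answer (PySem.Chars.findFrom s old (k : Int)) =
        ((List.range' k (s.length + 1 - k)).filter (pvP s old)).foldl (pvStep s old new) answer := by
  induction fuel with
  | zero =>
    intro k answer hk hfuel
    have hk' : k = s.length + 1 := by omega
    subst hk'
    simp [pvAGo]
  | succ fuel ih =>
    intro k answer hk hfuel
    by_cases hke : k = s.length + 1
    · subst hke
      have hff : PySem.Chars.findFrom s old ((s.length + 1 : Nat) : Int) = -1 := by
        have h0 : ¬((s.length : Int) + 1 < 0) := by omega
        push_cast
        simp [PySem.Chars.findFrom, h0]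
      rw [hff]
      simp [pvAGo]
    · have hk2 : k ≤ s.length := by omega
      rw [PySem.Chars.findFrom_natCast s old k hk2]
      by_cases hfind : PySem.Chars.find (s.drop k) old = -1
      · rw [if_pos hfind]
        have hempty : (List.range' k (s.length + 1 - k)).filter (pvP s old) = [] := by
          rw [List.filter_eq_nil_iff]
          intro a ha
          rw [List.mem_range'_1] at ha
          simp [pvP_false_of_no_infix s old k a ha.1
            ((PySem.Chars.find_eq_neg_one_iff _ _).mp hfind)]
        rw [hempty]
        simp [pvAGo]
      · rw [if_neg hfind]
        have hge : 0 ≤ PySem.Chars.find (s.drop k) old := by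
          have := PySem.Chars.neg_one_le_find (s.drop k) old
          omega
        set F := PySem.Chars.find (s.drop k) old with hFdef
        have hFle : F ≤ (s.drop k).length := PySem.Chars.find_le_length (s.drop k) old
        have hlen : (s.drop k).length = s.length - k := by simp
        have hkfle : k + F.toNat ≤ s.length := by omega
        have hspec := PySem.Chars.find_spec (s := s.drop k) (sub := old) hge
        have harg : (k : Int) + F = ((k + F.toNat : Nat) : Int) := by push_cast; omega
        rw [harg]
        have hpos : ((k + F.toNat : Nat) : Int) ≥ 0 := by positivity
        rw [pvAGo, if_pos hpos]
        have hslice1 : PySem.List.slice s none (some ((k + F.toNat : Nat) : Int)) =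
            s.take (k + F.toNat) := PySem.List.slice_to_natCast s _
        have hslice2 : PySem.List.slice s (some (((k + F.toNat : Nat) : Int) + (old.length : Int))) none =
            s.drop (k + F.toNat + old.length) := by
          rw [show ((k + F.toNat : Nat) : Int) + (old.length : Int) =
            ((k + F.toNat + old.length : Nat) : Int) by push_cast; ring]
          exact PySem.List.slice_from_natCast s _
        rw [show ((k + F.toNat : Nat) : Int) + 1 = ((k + F.toNat + 1 : Nat) : Int) by push_cast; ring]
        rw [ih (k + F.toNat + 1) _ (by omega) (by omega)]
        have hmatch : pvP s old (k + F.toNat) = true := by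
          unfold pvP
          rw [List.isPrefixOf_iff_prefix]
          have h1 := hspec.1
          rw [← hFdef] at h1
          rwa [List.drop_drop] at h1
        have hmin : ∀ i, k ≤ i → i < k + F.toNat → pvP s old i = false := by
          intro i hki hik
          unfold pvP
          rcases hb : old.isPrefixOf (s.drop i) with _ | _
          · rfl
          · exfalso
            apply hspec.2 (i - k) (by omega)
            rw [List.drop_drop, Nat.add_sub_cancel' hki]
            rwa [← List.isPrefixOf_iff_prefix]
        rw [pvFilter_split (pvP s old) k s.length F.toNat hkfle hmatch hmin]
        rw [List.foldl_cons]
        simp only [hslice1, hslice2]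
        rfl

-- bit p of the mask table entry for c: old[p] = c
lemma pvMask_testBit : ∀ (ol : List Char) (j : Nat) (d : PySem.Dict Char Nat) (c : Char) (p : Nat),
    ((pvMaskGo d j ol).getD c 0).testBit p =
      (((d.getD c 0).testBit p) || (decide (j ≤ p) && (ol[p - j]? == some c))) := by
  intro ol
  induction ol with
  | nil => intro j d c p; simp [pvMaskGo]
  | cons x xs ih =>
    intro j d c p
    rw [pvMaskGo, ih, PySem.Dict.getD_insert]
    by_cases hc : c = x
    · subst hc
      rw [if_pos rfl, Nat.testBit_or, Nat.one_shiftLeft, Nat.testBit_two_pow]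
      by_cases hpj : p = j
      · subst hpj
        simp
      · by_cases hlt : j + 1 ≤ p
        · have h1 : p - j = (p - (j + 1)) + 1 := by omega
          rw [h1, List.getElem?_cons_succ]
          simp only [hpj, decide_eq_true_eq, decide_true, Bool.true_and, Bool.false_or,
            decide_eq_false (show ¬ j = p from fun h => hpj h.symm)]
          rw [decide_eq_true hlt, decide_eq_true (show j ≤ p by omega)]
          simp [Bool.or_assoc]
        · have hja : ¬ j ≤ p := by omega
          have hjb : ¬ j + 1 ≤ p := hlt
          simp [decide_eq_false (show ¬ j = p from fun h => hpj h.symm),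
            decide_eq_false hja, decide_eq_false hjb]
          intro h
          exact absurd (show j ≤ p by omega) hja
    · rw [if_neg hc]
      by_cases hpj : p = j
      · subst hpj
        have : ((x :: xs)[p - p]? == some c) = false := by
          simp only [Nat.sub_self, List.getElem?_cons_zero]
          simp [beq_iff_eq]
          exact fun h => hc h.symm
        simp [this]
        intro h
        exact absurd h.symm hc
      · by_cases hlt : j + 1 ≤ p
        · have h1 : p - j = (p - (j + 1)) + 1 := by omega
          rw [h1, List.getElem?_cons_succ]
          rw [decide_eq_true hlt, decide_eq_true (show j ≤ p by omega)]
        · have hja : ¬ j ≤ p := by omega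
          simp [decide_eq_false hja, decide_eq_false hlt]
          intro h
          exact absurd (show j ≤ p by omega) hja

-- a concat is a suffix of a concat iff the last chars agree and the fronts are suffixes
lemma pvConcat_suffix_concat (u v : List Char) (a b : Char) :
    (u ++ [a]) <:+ (v ++ [b]) ↔ a = b ∧ u <:+ v := by
  constructor
  · rintro ⟨w, hw⟩
    rw [← List.append_assoc] at hw
    obtain ⟨h1, h2⟩ := List.append_inj' hw (by simp)
    refine ⟨by simpa using h2, ⟨w, h1⟩⟩
  · rintro ⟨rfl, ⟨w, rfl⟩⟩
    exact ⟨w, by simp⟩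

-- old is a suffix of the processed prefix iff it matches at position i+1-m
lemma pvSuffix_full (s old : List Char) (i : Nat) (hi : i < s.length) (hm : 1 ≤ old.length) :
    (old <:+ s.take (i + 1)) ↔ (old.length ≤ i + 1 ∧ pvP s old (i + 1 - old.length) = true) := by
  have hlen : (s.take (i + 1)).length = i + 1 := by simp; omega
  constructor
  · rintro h
    have hm2 : old.length ≤ i + 1 := by
      have := h.length_le
      omega
    obtain ⟨u, hu⟩ := h
    have hul : u.length = i + 1 - old.length := by
      have := congrArg List.length hu
      simp at this
      omega
    refine ⟨hm2, ?_⟩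
    unfold pvP
    rw [List.isPrefixOf_iff_prefix]
    have hdrop : s.drop (i + 1 - old.length) = old ++ s.drop (i + 1) := by
      have hs : s = u ++ (old ++ s.drop (i + 1)) := by
        rw [← List.append_assoc, hu, List.take_append_drop]
      calc s.drop (i + 1 - old.length)
          = (u ++ (old ++ s.drop (i + 1))).drop u.length := by rw [← hs, hul]
        _ = old ++ s.drop (i + 1) := List.drop_left
    rw [hdrop]
    exact List.prefix_append old _
  · rintro ⟨hm2, hp⟩
    unfold pvP at hp
    rw [List.isPrefixOf_iff_prefix] at hp
    obtain ⟨t, ht⟩ := hp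
    refine ⟨s.take (i + 1 - old.length), ?_⟩
    conv_rhs => rw [show i + 1 = (i + 1 - old.length) + old.length by omega, List.take_add]
    rw [← ht, List.take_left]

-- x & (1 << k) is nonzero exactly when bit k of x is set
lemma pvAnd_hi_ne_zero (x k : Nat) : (x &&& (1 <<< k) ≠ 0) ↔ x.testBit k = true := by
  rw [Nat.one_shiftLeft]
  constructor
  · intro h
    by_contra hb
    apply h
    apply Nat.eq_of_testBit_eq
    intro j
    rw [Nat.testBit_and, Nat.testBit_two_pow, Nat.zero_testBit]
    by_cases hj : k = j
    · subst hj
      simp [Bool.eq_false_iff.mpr (fun hh => hb hh)]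
    · simp [hj]
  · intro h hz
    have := congrArg (fun y => y.testBit k) hz
    simp [Nat.testBit_and, Nat.testBit_two_pow, h] at this

-- CHARACTERIZATION OF B's LOOP (Shift-And invariant): if bit p of state says "the first p+1
-- chars of old end at the processed prefix", the loop folds pvStep over the remaining matches
lemma pvBGo_inv (s old new : List Char) (mask : PySem.Dict Char Nat)
    (hm : 1 ≤ old.length)
    (hmask : ∀ c p, ((mask.getD c 0).testBit p) = (old[p]? == some c)) :
    ∀ (rest : List Char) (i : Nat) (state : Nat) (answer : PySem.Set (List Char)),
      rest = s.drop i → i ≤ s.length →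
      (∀ p, state.testBit p =
        (decide (p < old.length) && decide (old.take (p + 1) <:+ s.take i))) →
      pvBGo s old new mask (1 <<< (old.length - 1)) i state answer rest =
        ((List.range' (i + 1 - old.length) (s.length + 1 - (i + 1 - old.length))).filter
          (pvP s old)).foldl (pvStep s old new) answer := by
  intro rest
  induction rest with
  | nil =>
    intro i state answer hrest hi hstate
    have hin : i = s.length := by
      have := congrArg List.length hrest
      simp at this
      omega
    subst hin
    rw [pvBGo]
    have hempty : (List.range' (s.length + 1 - old.length)
        (s.length + 1 - (s.length + 1 - old.length))).filter (pvP s old) = [] := by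
      rw [List.filter_eq_nil_iff]
      intro q hq
      rw [List.mem_range'_1] at hq
      simp [pvP_false_of_lt s old q (by omega) (by omega)]
    rw [hempty]
    rfl
  | cons c rest' ih =>
    intro i state answer hrest hi hstate
    have hilt : i < s.length := by
      have := congrArg List.length hrest
      simp at this
      omega
    have hdec := List.drop_eq_getElem_cons hilt
    have hcr : c = s[i] ∧ rest' = s.drop (i + 1) := by
      have h2 := hrest.trans hdec
      exact ⟨(List.cons.injEq _ _ _ _ ▸ h2).1, (List.cons.injEq _ _ _ _ ▸ h2).2⟩
    obtain ⟨hc, hr'⟩ := hcr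
    subst hc
    have hone : ∀ p : Nat, (1 : Nat).testBit p = decide (p = 0) := by
      intro p
      rw [show (1 : Nat) = 2 ^ 0 by norm_num, Nat.testBit_two_pow]
      simp [eq_comm]
    have hstate' : ∀ p, (((state <<< 1) ||| 1) &&& mask.getD (s[i]) 0).testBit p
        = (decide (p < old.length) && decide (old.take (p + 1) <:+ s.take (i + 1))) := by
      intro p
      rw [Nat.testBit_and, Nat.testBit_or, Nat.testBit_shiftLeft, hmask, hone]
      by_cases hp : p < old.length
      · have hget : old[p]? = some old[p] := List.getElem?_eq_getElem hp
        rw [hget]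
        have hbeq : (some old[p] == some (s[i])) = decide (old[p] = s[i]) := by
          by_cases he : old[p] = s[i]
          · simp [he]
          · simp [he]
        have hou : old.take (p + 1) = old.take p ++ [old[p]] := by
          rw [List.take_add_one]
          simp [List.getElem?_eq_getElem hp]
        have hsu : s.take (i + 1) = s.take i ++ [s[i]] := by
          rw [List.take_add_one]
          simp [List.getElem?_eq_getElem hilt]
        have hRHS : decide (old.take (p + 1) <:+ s.take (i + 1)) =
            (decide (old[p] = s[i]) && decide (old.take p <:+ s.take i)) := by
          rw [hou, hsu, ← Bool.decide_and]
          exact decide_eq_decide.mpr (pvConcat_suffix_concat _ _ _ _)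
        rw [hbeq, hRHS, decide_eq_true hp, Bool.true_and]
        cases p with
        | zero =>
          simp [List.nil_suffix]
        | succ p' =>
          rw [Nat.add_sub_cancel, hstate p']
          rw [decide_eq_true (show 1 ≤ p' + 1 by omega),
            decide_eq_false (show ¬ p' + 1 = 0 by omega),
            decide_eq_true (show p' < old.length by omega)]
          simp [Bool.and_comm]
      · have hget : old[p]? = none := by
          rw [List.getElem?_eq_none_iff]
          omega
        rw [hget, decide_eq_false hp]
        simp
    have hfire : ((((state <<< 1) ||| 1) &&& mask.getD (s[i]) 0) &&& (1 <<< (old.length - 1)) ≠ 0)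
        ↔ (old.length ≤ i + 1 ∧ pvP s old (i + 1 - old.length) = true) := by
      rw [pvAnd_hi_ne_zero, hstate', show old.length - 1 + 1 = old.length by omega,
        List.take_length, decide_eq_true (show old.length - 1 < old.length by omega),
        Bool.true_and]
      rw [decide_eq_true_eq]
      exact pvSuffix_full s old i hilt hm
    rw [pvBGo]
    simp only []
    by_cases hf : (((state <<< 1) ||| 1) &&& mask.getD (s[i]) 0) &&& (1 <<< (old.length - 1)) ≠ 0
    · rw [if_pos hf]
      obtain ⟨hm2, hq⟩ := hfire.mp hf
      rw [ih (i + 1) _ _ hr' (by omega) hstate']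
      have hsplit : (List.range' (i + 1 - old.length)
            (s.length + 1 - (i + 1 - old.length))).filter (pvP s old) =
          (i + 1 - old.length) :: (List.range' (i + 1 + 1 - old.length)
            (s.length + 1 - (i + 1 + 1 - old.length))).filter (pvP s old) := by
        rw [show i + 1 + 1 - old.length = (i + 1 - old.length) + 1 by omega,
          show s.length + 1 - (i + 1 - old.length) =
            (s.length + 1 - ((i + 1 - old.length) + 1)) + 1 by omega,
          List.range'_succ, List.filter_cons_of_pos hq]
      rw [hsplit, List.foldl_cons]
      rfl
    · rw [if_neg hf]
      rw [ih (i + 1) _ _ hr' (by omega) hstate']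
      have hnot : ¬ (old.length ≤ i + 1 ∧ pvP s old (i + 1 - old.length) = true) :=
        fun hcon => hf (hfire.mpr hcon)
      by_cases hm2 : old.length ≤ i + 1
      · have hq : pvP s old (i + 1 - old.length) = false := by
          rcases hb : pvP s old (i + 1 - old.length) with _ | _
          · rfl
          · exact absurd ⟨hm2, hb⟩ hnot
        rw [show i + 1 + 1 - old.length = (i + 1 - old.length) + 1 by omega,
          show s.length + 1 - (i + 1 - old.length) =
            (s.length + 1 - ((i + 1 - old.length) + 1)) + 1 by omega,
          List.range'_succ, List.filter_cons_of_neg (by simp [hq])]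
      · rw [show i + 1 + 1 - old.length = i + 1 - old.length by omega]

-- ===== VERDICT (by name: the statement is the Claim_ definition above) =====
theorem make_replacements_spec : Claim_equal_make_replacements := by
  intro starter rule _ hpre
  unfold Spec_make_replacements
  have hm : 1 ≤ rule.1.toList.length := by
    rcases h : rule.1.toList with _ | ⟨c, cs⟩
    · exfalso
      apply hpre
      have h2 : rule.1.toList = ("" : String).toList := h
      exact String.toList_injective h2
    · simp
  have e1 : make_replacements starter rule =
      (pvAGo starter.toList rule.1.toList rule.2.toList (starter.toList.length + 1) []
        (PySem.Chars.find starter.toList rule.1.toList)).map String.ofList := rfl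
  have e2 : make_replacements_alt starter rule =
      (pvBGo starter.toList rule.1.toList rule.2.toList (pvMaskGo PySem.Dict.empty 0 rule.1.toList)
        (1 <<< (rule.1.toList.length - 1)) 0 0 [] starter.toList).map String.ofList := rfl
  have hA := pvAGo_char starter.toList rule.1.toList rule.2.toList (starter.toList.length + 1)
    0 [] (by omega) (by omega)
  have hfind : PySem.Chars.findFrom starter.toList rule.1.toList ((0 : Nat) : Int) =
      PySem.Chars.find starter.toList rule.1.toList := by
    rw [Nat.cast_zero]
    exact PySem.Chars.findFrom_zero starter.toList rule.1.toList
  rw [hfind] at hA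
  simp only [Nat.sub_zero] at hA
  have hmask : ∀ c p, (((pvMaskGo PySem.Dict.empty 0 rule.1.toList).getD c 0).testBit p) =
      (rule.1.toList[p]? == some c) := by
    intro c p
    rw [pvMask_testBit, PySem.Dict.getD_empty, Nat.zero_testBit]
    simp
  have hzero : ∀ p, (0 : Nat).testBit p =
      (decide (p < rule.1.toList.length) &&
        decide (rule.1.toList.take (p + 1) <:+ starter.toList.take 0)) := by
    intro p
    rw [Nat.zero_testBit, List.take_zero]
    have : ¬ (rule.1.toList.take (p + 1) <:+ ([] : List Char)) := by
      rw [List.suffix_nil, List.take_eq_nil_iff]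
      push_neg
      constructor
      · omega
      · intro h2
        rw [h2] at hm
        simp at hm
    simp [this]
  have hB := pvBGo_inv starter.toList rule.1.toList rule.2.toList
    (pvMaskGo PySem.Dict.empty 0 rule.1.toList) hm hmask starter.toList 0 0 []
    (starter.toList.drop_zero).symm (by omega) hzero
  rw [show 0 + 1 - rule.1.toList.length = 0 by omega, Nat.sub_zero] at hB
  rw [e1, e2, hA, hB]
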